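-- pv_equiv track=rewrite | github.com/palanshagarwal/Startup-job-search | search/views.py | filter_market
-- ===== SOURCE A (Python) =====
-- market_include={'business':1,'finance':1,'manage':1,'customer':1,'sales':1,'operation':1,'marketing':1,'human resource':1}
--
-- market_exclude={'developer':1,'engineer':1}
--
-- def filter_market(tags):
--     Skillflag=False
--     sflag=False
--     rflag=False
--     for i in tags:
--         if i['tag_type']=='SkillTag':
--             for j in market_include:
--                 if j in (i['name']):
--                     Skillflag=True
--                     break
--     for i in tags:
--         if i['tag_type']=='RoleTag':
--             for j in market_exclude:
--                 if j in (i['name']):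
--                     Skillflag=False
--                     rflag=True
--                     break
--
--     if Skillflag==False and rflag==False:
--         for i in tags:
--             if i['tag_type']=='RoleTag':
--                 for j in market_include:
--                     if j in (i['name']):
--                         Skillflag=True
--                         break
--     # print Skillflag
--     return Skillflag
-- ===== SOURCE B (Python) =====
-- INCLUDE = ('business', 'finance', 'manage', 'customer', 'sales',
--            'operation', 'marketing', 'human resource')
-- EXCLUDE = ('developer', 'engineer')
--
-- def filter_market(tags):
--     skill = role_excl = role_incl = False
--     for t in tags:
--         tt = t['tag_type']
--         if tt == 'SkillTag':
--             name = t['name']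
--             skill = skill or any(j in name for j in INCLUDE)
--         elif tt == 'RoleTag':
--             name = t['name']
--             role_excl = role_excl or any(j in name for j in EXCLUDE)
--             role_incl = role_incl or any(j in name for j in INCLUDE)
--     return False if role_excl else (True if skill else role_incl)
-- ===== Notes on version B (the rewrite author's own statement) =====
-- stated objective: simpler
-- what changed: Replaces A's three separate scans over tags with flag-mutation sequencing by a single pass maintaining three independent booleans (skill match, role exclude, role include) and one closed-form decision expression at the end.
import Mathlib
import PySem

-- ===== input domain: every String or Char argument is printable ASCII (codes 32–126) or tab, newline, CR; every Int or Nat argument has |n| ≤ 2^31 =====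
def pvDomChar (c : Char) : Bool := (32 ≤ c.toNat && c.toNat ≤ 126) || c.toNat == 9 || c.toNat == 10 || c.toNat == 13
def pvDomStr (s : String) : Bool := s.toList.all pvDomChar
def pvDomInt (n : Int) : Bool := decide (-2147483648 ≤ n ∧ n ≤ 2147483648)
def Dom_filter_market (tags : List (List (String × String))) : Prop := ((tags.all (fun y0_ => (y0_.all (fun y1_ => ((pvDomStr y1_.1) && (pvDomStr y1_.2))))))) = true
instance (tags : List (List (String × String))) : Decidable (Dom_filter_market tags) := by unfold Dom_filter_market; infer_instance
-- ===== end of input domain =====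

-- B is a single pass with three independent boolean flags and a closed-form final decision (objective: simpler).

-- shared helpers: Python dict lookup d[k] (first match; Pre_ guarantees the key is present wherever A reads it)
def tagGet (tag : List (String × String)) (k : String) : String :=
  ((tag.find? (fun p => p.1 == k)).map Prod.snd).getD ""
def tagHas (tag : List (String × String)) (k : String) : Bool :=
  tag.any (fun p => p.1 == k)
-- keys of market_include / market_exclude, in dict insertion order
def marketInclude : List String :=
  ["business", "finance", "manage", "customer", "sales", "operation", "marketing", "human resource"]
def marketExclude : List String := ["developer", "engineer"]

-- ===== PORT A =====
-- three successive loops over tags, the third one conditional, exactly as in A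
def filter_market (tags : List (List (String × String))) : Bool :=
  let skill1 := tags.foldl (fun sk i =>
      if tagGet i "tag_type" == "SkillTag" then
        if marketInclude.any (fun j => PySem.Str.isIn j (tagGet i "name")) then true else sk
      else sk) false
  let st := tags.foldl (fun (p : Bool × Bool) i =>
      if tagGet i "tag_type" == "RoleTag" then
        if marketExclude.any (fun j => PySem.Str.isIn j (tagGet i "name")) then (false, true) else p
      else p) (skill1, false)
  if st.1 == false && st.2 == false then
    tags.foldl (fun sk i =>
      if tagGet i "tag_type" == "RoleTag" then
        if marketInclude.any (fun j => PySem.Str.isIn j (tagGet i "name")) then true else sk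
      else sk) st.1
  else st.1

-- ===== PORT B =====
def filter_market_alt (tags : List (List (String × String))) : Bool :=
  let acc := tags.foldl (fun (st : Bool × Bool × Bool) i =>
      let tt := tagGet i "tag_type"
      if tt == "SkillTag" then
        (st.1 || marketInclude.any (fun j => PySem.Str.isIn j (tagGet i "name")), st.2.1, st.2.2)
      else if tt == "RoleTag" then
        (st.1,
         st.2.1 || marketExclude.any (fun j => PySem.Str.isIn j (tagGet i "name")),
         st.2.2 || marketInclude.any (fun j => PySem.Str.isIn j (tagGet i "name")))
      else st) (false, false, false)
  if acc.2.1 then false else if acc.1 then true else acc.2.2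

-- ===== PRECONDITION & SPEC =====
-- Pre_ excludes exactly the inputs where Python A raises KeyError: a tag without 'tag_type',
-- or a SkillTag/RoleTag without 'name'.
def Pre_filter_market (tags : List (List (String × String))) : Prop :=
  ∀ tag ∈ tags, tagHas tag "tag_type" = true ∧
    ((tagGet tag "tag_type" = "SkillTag" ∨ tagGet tag "tag_type" = "RoleTag") →
      tagHas tag "name" = true)
instance (tags : List (List (String × String))) : Decidable (Pre_filter_market tags) := by
  unfold Pre_filter_market; infer_instance
def pvWitness_filter_market : (List (List (String × String))) :=
  [[("tag_type", "SkillTag"), ("name", "sales")], [("tag_type", "RoleTag"), ("name", "manager")]]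
def Spec_filter_market (tags : List (List (String × String))) (out : Bool) : Prop := out = filter_market_alt tags
instance (tags : List (List (String × String))) (out : Bool) : Decidable (Spec_filter_market tags out) := by unfold Spec_filter_market; infer_instance

-- ===== CLAIM (what is proved, stated in full; the proofs are below) =====
def Claim_equal_filter_market : Prop := ∀ (tags : List (List (String × String))), Dom_filter_market tags → Pre_filter_market tags → Spec_filter_market tags (filter_market tags)

-- ===== LEMMAS AND PROOFS =====

-- abbreviations for the three per-tag tests
def isSkillInc (i : List (String × String)) : Bool :=
  (tagGet i "tag_type" == "SkillTag") && marketInclude.any (fun j => PySem.Str.isIn j (tagGet i "name"))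
def isRoleExc (i : List (String × String)) : Bool :=
  (tagGet i "tag_type" == "RoleTag") && marketExclude.any (fun j => PySem.Str.isIn j (tagGet i "name"))
def isRoleInc (i : List (String × String)) : Bool :=
  (tagGet i "tag_type" == "RoleTag") && marketInclude.any (fun j => PySem.Str.isIn j (tagGet i "name"))

theorem foldA1_eq (tags : List (List (String × String))) (b : Bool) :
    tags.foldl (fun sk i =>
      if tagGet i "tag_type" == "SkillTag" then
        if marketInclude.any (fun j => PySem.Str.isIn j (tagGet i "name")) then true else sk
      else sk) b = (b || tags.any isSkillInc) := by
  induction tags generalizing b with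
  | nil => simp
  | cons i t ih =>
    simp only [List.foldl_cons, List.any_cons, ih, isSkillInc]
    generalize (tagGet i "tag_type" == "SkillTag") = x
    generalize (marketInclude.any fun j => PySem.Str.isIn j (tagGet i "name")) = y
    cases x <;> cases y <;> cases b <;> simp

theorem foldA3_eq (tags : List (List (String × String))) (b : Bool) :
    tags.foldl (fun sk i =>
      if tagGet i "tag_type" == "RoleTag" then
        if marketInclude.any (fun j => PySem.Str.isIn j (tagGet i "name")) then true else sk
      else sk) b = (b || tags.any isRoleInc) := by
  induction tags generalizing b with
  | nil => simp
  | cons i t ih =>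
    simp only [List.foldl_cons, List.any_cons, ih, isRoleInc]
    generalize (tagGet i "tag_type" == "RoleTag") = x
    generalize (marketInclude.any fun j => PySem.Str.isIn j (tagGet i "name")) = y
    cases x <;> cases y <;> cases b <;> simp

theorem foldA2_eq (tags : List (List (String × String))) (p : Bool × Bool) :
    tags.foldl (fun (p : Bool × Bool) i =>
      if tagGet i "tag_type" == "RoleTag" then
        if marketExclude.any (fun j => PySem.Str.isIn j (tagGet i "name")) then (false, true) else p
      else p) p = (if tags.any isRoleExc then (false, true) else p) := by
  induction tags generalizing p with
  | nil => simp
  | cons i t ih =>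
    simp only [List.foldl_cons, List.any_cons, ih]
    have hd : isRoleExc i = ((tagGet i "tag_type" == "RoleTag") &&
        marketExclude.any (fun j => PySem.Str.isIn j (tagGet i "name"))) := rfl
    cases hx : (tagGet i "tag_type" == "RoleTag") <;>
      cases hy : (marketExclude.any fun j => PySem.Str.isIn j (tagGet i "name")) <;>
      simp only [hd, hx, hy] <;> simp

theorem skill_role_ne (i : List (String × String))
    (h1 : (tagGet i "tag_type" == "SkillTag") = true) :
    (tagGet i "tag_type" == "RoleTag") = false := by
  cases hb : (tagGet i "tag_type" == "RoleTag") with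
  | false => rfl
  | true => exact absurd (eq_of_beq hb ▸ eq_of_beq h1) (by decide)

theorem foldB_eq (tags : List (List (String × String))) (st : Bool × Bool × Bool) :
    tags.foldl (fun (st : Bool × Bool × Bool) i =>
      let tt := tagGet i "tag_type"
      if tt == "SkillTag" then
        (st.1 || marketInclude.any (fun j => PySem.Str.isIn j (tagGet i "name")), st.2.1, st.2.2)
      else if tt == "RoleTag" then
        (st.1,
         st.2.1 || marketExclude.any (fun j => PySem.Str.isIn j (tagGet i "name")),
         st.2.2 || marketInclude.any (fun j => PySem.Str.isIn j (tagGet i "name")))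
      else st) st
    = (st.1 || tags.any isSkillInc, st.2.1 || tags.any isRoleExc, st.2.2 || tags.any isRoleInc) := by
  induction tags generalizing st with
  | nil => simp
  | cons i t ih =>
    simp only [List.foldl_cons, List.any_cons, ih, isSkillInc, isRoleExc, isRoleInc]
    by_cases h1 : (tagGet i "tag_type" == "SkillTag") = true
    · have h2 := skill_role_ne i h1
      generalize (marketInclude.any fun j => PySem.Str.isIn j (tagGet i "name")) = y
      simp [h1, h2, Bool.or_assoc]
    · by_cases h2 : (tagGet i "tag_type" == "RoleTag") = true
      · generalize (marketInclude.any fun j => PySem.Str.isIn j (tagGet i "name")) = y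
        generalize (marketExclude.any fun j => PySem.Str.isIn j (tagGet i "name")) = z
        simp [h1, h2, Bool.or_assoc]
      · simp [h1, h2]

-- ===== VERDICT (by name: the statement is the Claim_ definition above) =====
theorem filter_market_spec : Claim_equal_filter_market := by
  intro tags _ _
  show filter_market tags = filter_market_alt tags
  simp only [filter_market, filter_market_alt, foldA1_eq, foldA2_eq, foldB_eq, foldA3_eq]
  cases h1 : tags.any isSkillInc <;> cases h2 : tags.any isRoleExc <;>
    cases h3 : tags.any isRoleInc <;> simp
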